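-- pv_equiv track=rewrite | github.com/Right5963/metacard- | process_txt_files.py | categorize_tags
-- ===== SOURCE A (Python) =====
-- TAG_CATEGORIES = {
--     "character": [
--         "1girl", "solo", "multiple girls", "1boy", "2girls", "multiple boys",
--         "girl", "boy", "female", "male", "blonde", "brown hair", "black hair",
--         "blue eyes", "green eyes", "brown eyes", "red eyes", "purple eyes",
--         "twintails", "ponytail", "long hair", "short hair", "medium hair",
--         "hair ornament", "hair ribbon", "ribbon", "sidelocks", "bangs"
--     ],
--     "clothing": [
--         "buruma", "gym uniform", "shirt", "gym shirt", "socks", "kneehighs",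
--         "sportswear", "gym shorts", "shorts", "underwear", "panties", "bra",
--         "no bra", "clothes lift", "shirt lift", "open clothes", "clothes pull"
--     ],
--     "body": [
--         "breasts", "large breasts", "medium breasts", "nipples", "censored nipples",
--         "breasts out", "large areolae", "areola slip", "nipple slip", "thighs",
--         "thick thighs", "ass", "cameltoe", "navel", "stomach", "midriff",
--         "legs", "feet", "kneepits", "shiny skin", "groin tendon", "sweat"
--     ],
--     "pose": [
--         "on back", "lying", "sitting", "presenting", "on bed", "spread legs",
--         "facing viewer"
--     ],
--     "expression": [
--         "blush", "smile", "closed eyes", "half-closed eyes", "closed mouth",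
--         "open mouth", "parted lips", "looking at viewer", "one eye closed"
--     ],
--     "background": [
--         "simple background", "black background", "bed", "bed sheet"
--     ],
--     "quality": [
--         "sketch", "identity censor", "glitch", "see-through", "ass focus",
--         "partially visible vulva", "censored", "feet out of frame"
--     ],
--     "color": [
--         "white shirt", "blue buruma", "black buruma", "light brown hair"
--     ]
-- }
--
-- def categorize_tags(tags):
--     """タグをカテゴリ別に分類"""
--     categorized = {category: [] for category in TAG_CATEGORIES}
--     categorized["uncategorized"] = []
--
--     for tag in tags:
--         placed = False
--         for category, category_tags in TAG_CATEGORIES.items():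
--             # 完全一致または下位タグのチェック
--             if tag in category_tags or any(cat_tag in tag for cat_tag in category_tags):
--                 categorized[category].append(tag)
--                 placed = True
--                 break
--
--         if not placed:
--             categorized["uncategorized"].append(tag)
--
--     # 空のカテゴリを削除
--     return {k: v for k, v in categorized.items() if v}
-- ===== SOURCE B (Python) =====
-- TAG_CATEGORIES = {
--     "character": [
--         "1girl", "solo", "multiple girls", "1boy", "2girls", "multiple boys",
--         "girl", "boy", "female", "male", "blonde", "brown hair", "black hair",
--         "blue eyes", "green eyes", "brown eyes", "red eyes", "purple eyes",
--         "twintails", "ponytail", "long hair", "short hair", "medium hair",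
--         "hair ornament", "hair ribbon", "ribbon", "sidelocks", "bangs"
--     ],
--     "clothing": [
--         "buruma", "gym uniform", "shirt", "gym shirt", "socks", "kneehighs",
--         "sportswear", "gym shorts", "shorts", "underwear", "panties", "bra",
--         "no bra", "clothes lift", "shirt lift", "open clothes", "clothes pull"
--     ],
--     "body": [
--         "breasts", "large breasts", "medium breasts", "nipples", "censored nipples",
--         "breasts out", "large areolae", "areola slip", "nipple slip", "thighs",
--         "thick thighs", "ass", "cameltoe", "navel", "stomach", "midriff",
--         "legs", "feet", "kneepits", "shiny skin", "groin tendon", "sweat"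
--     ],
--     "pose": [
--         "on back", "lying", "sitting", "presenting", "on bed", "spread legs",
--         "facing viewer"
--     ],
--     "expression": [
--         "blush", "smile", "closed eyes", "half-closed eyes", "closed mouth",
--         "open mouth", "parted lips", "looking at viewer", "one eye closed"
--     ],
--     "background": [
--         "simple background", "black background", "bed", "bed sheet"
--     ],
--     "quality": [
--         "sketch", "identity censor", "glitch", "see-through", "ass focus",
--         "partially visible vulva", "censored", "feet out of frame"
--     ],
--     "color": [
--         "white shirt", "blue buruma", "black buruma", "light brown hair"
--     ]
-- }
--
-- def categorize_tags(tags):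
--     """タグをカテゴリ別に分類 (category-outer sweep over still-unplaced tags)"""
--     # state: (tag, placed) pairs in original order; duplicates kept apart by position
--     state = [(tag, False) for tag in tags]
--     result = {}
--     for category, category_tags in TAG_CATEGORIES.items():
--         bucket = []
--         new_state = []
--         for tag, placed in state:
--             if not placed and any(cat_tag in tag for cat_tag in category_tags):
--                 bucket.append(tag)
--                 new_state.append((tag, True))
--             else:
--                 new_state.append((tag, placed))
--         state = new_state
--         if bucket:
--             result[category] = bucket
--     rest = [tag for tag, placed in state if not placed]
--     if rest:
--         result["uncategorized"] = rest
--     return result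
-- ===== Notes on version B (the rewrite author's own statement) =====
-- stated objective: alternative
-- what changed: B inverts the loop nesting: it sweeps the categories as the OUTER loop, each pass collecting the still-unplaced tags (tracked by a parallel placed flag per position) that match, then gathers the leftovers as uncategorized; A loops over tags and probes the categories per tag, mutating a running dict and filtering empties afterwards.
import Mathlib
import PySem

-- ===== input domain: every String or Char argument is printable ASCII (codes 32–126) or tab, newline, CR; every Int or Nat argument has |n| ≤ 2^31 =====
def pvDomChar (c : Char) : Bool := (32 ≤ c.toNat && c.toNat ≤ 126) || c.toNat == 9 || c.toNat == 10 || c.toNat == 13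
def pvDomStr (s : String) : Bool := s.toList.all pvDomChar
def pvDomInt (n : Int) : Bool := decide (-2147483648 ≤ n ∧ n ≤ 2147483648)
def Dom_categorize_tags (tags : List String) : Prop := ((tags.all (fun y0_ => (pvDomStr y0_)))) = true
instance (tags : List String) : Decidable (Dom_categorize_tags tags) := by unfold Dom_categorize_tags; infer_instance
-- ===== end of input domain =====

-- B inverts the loop nesting: the categories are the OUTER loop, each pass sweeps the still-unplaced
-- tags (a placed flag per position) and collects the matches; A loops over tags probing categories.
-- Objective: alternative decomposition, same cost.

-- ===== PORT A =====
-- TAG_CATEGORIES as its items list (insertion order)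
def tagCategories : List (String × List String) := [
  ("character", ["1girl", "solo", "multiple girls", "1boy", "2girls", "multiple boys", "girl", "boy", "female", "male", "blonde", "brown hair", "black hair", "blue eyes", "green eyes", "brown eyes", "red eyes", "purple eyes", "twintails", "ponytail", "long hair", "short hair", "medium hair", "hair ornament", "hair ribbon", "ribbon", "sidelocks", "bangs"]),
  ("clothing", ["buruma", "gym uniform", "shirt", "gym shirt", "socks", "kneehighs", "sportswear", "gym shorts", "shorts", "underwear", "panties", "bra", "no bra", "clothes lift", "shirt lift", "open clothes", "clothes pull"]),
  ("body", ["breasts", "large breasts", "medium breasts", "nipples", "censored nipples", "breasts out", "large areolae", "areola slip", "nipple slip", "thighs", "thick thighs", "ass", "cameltoe", "navel", "stomach", "midriff", "legs", "feet", "kneepits", "shiny skin", "groin tendon", "sweat"]),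
  ("pose", ["on back", "lying", "sitting", "presenting", "on bed", "spread legs", "facing viewer"]),
  ("expression", ["blush", "smile", "closed eyes", "half-closed eyes", "closed mouth", "open mouth", "parted lips", "looking at viewer", "one eye closed"]),
  ("background", ["simple background", "black background", "bed", "bed sheet"]),
  ("quality", ["sketch", "identity censor", "glitch", "see-through", "ass focus", "partially visible vulva", "censored", "feet out of frame"]),
  ("color", ["white shirt", "blue buruma", "black buruma", "light brown hair"])
]

-- A's inner `for category, category_tags in TAG_CATEGORIES.items(): ... break` loop:
-- the first matching category, `none` = the `placed` flag stayed False
def firstCategoryA (tag : String) : List (String × List String) → Option String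
  | [] => none
  | (c, cts) :: rest =>
    if cts.contains tag || cts.any (fun ct => PySem.Str.isIn ct tag) then some c
    else firstCategoryA tag rest

def categorize_tags (tags : List String) : List (String × List String) :=
  -- categorized = {category: [] for category in TAG_CATEGORIES}; categorized["uncategorized"] = []
  let d0 : PySem.Dict String (List String) :=
    (tagCategories.foldl (fun d p => d.insert p.1 []) PySem.Dict.empty).insert "uncategorized" []
  -- for tag in tags: append to the first matching category, else to "uncategorized"
  let d := tags.foldl (fun d tag =>
    match firstCategoryA tag tagCategories with
    | some c => d.modify c [] (fun v => v ++ [tag])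
    | none   => d.modify "uncategorized" [] (fun v => v ++ [tag])) d0
  -- {k: v for k, v in categorized.items() if v}
  d.items.filter (fun kv => !kv.2.isEmpty)

-- ===== PORT B =====
-- one category pass: sweep the (tag, placed) state, collecting the newly matched tags
-- (python's inner `for tag, placed in state:` loop with its two append lists)
def scanCat (cts : List String) : List (String × Bool) → List String × List (String × Bool)
  | [] => ([], [])
  | (tag, placed) :: rest =>
    let r := scanCat cts rest
    if !placed && cts.any (fun ct => PySem.Str.isIn ct tag) then
      (tag :: r.1, (tag, true) :: r.2)
    else
      (r.1, (tag, placed) :: r.2)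

def categorize_tags_alt (tags : List String) : List (String × List String) :=
  -- state = [(tag, False) for tag in tags]
  let state0 : List (String × Bool) := tags.map (fun tag => (tag, false))
  -- for category, category_tags in TAG_CATEGORIES.items(): ...
  let rs := tagCategories.foldl (fun acc p =>
      let bs := scanCat p.2 acc.2
      (if bs.1.isEmpty then acc.1 else acc.1 ++ [(p.1, bs.1)], bs.2))
    (([] : List (String × List String)), state0)
  -- rest = [tag for tag, placed in state if not placed]; if rest: result["uncategorized"] = rest
  let rest := rs.2.filterMap (fun tp => if tp.2 then none else some tp.1)
  if rest.isEmpty then rs.1 else rs.1 ++ [("uncategorized", rest)]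

-- ===== PRECONDITION & SPEC =====
def Spec_categorize_tags (tags : List String) (out : List (String × List String)) : Prop := out = categorize_tags_alt tags
instance (tags : List String) (out : List (String × List String)) : Decidable (Spec_categorize_tags tags out) := by unfold Spec_categorize_tags; infer_instance

-- ===== CLAIM (what is proved, stated in full; the proofs are below) =====
def Claim_equal_categorize_tags : Prop := ∀ (tags : List String), Dom_categorize_tags tags → Spec_categorize_tags tags (categorize_tags tags)

-- ===== LEMMAS AND PROOFS =====

-- the first category one of whose tags is a substring of `tag` (proof-side canonical form)
def categoryOf (tag : String) : String :=
  match tagCategories.find? (fun p => p.2.any (fun ct => PySem.Str.isIn ct tag)) with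
  | some p => p.1
  | none   => "uncategorized"

theorem isIn_self (s : String) : PySem.Str.isIn s s = true := by
  rw [PySem.Str.isIn_iff_infix]

-- A's exact-match disjunct `tag in category_tags` is subsumed by the substring disjunct
theorem cond_eq (tag : String) (cts : List String) :
    (cts.contains tag || cts.any (fun ct => PySem.Str.isIn ct tag))
      = cts.any (fun ct => PySem.Str.isIn ct tag) := by
  cases h : cts.contains tag
  · rw [Bool.false_or]
  · rw [Bool.true_or]
    have : cts.any (fun ct => PySem.Str.isIn ct tag) = true :=
      List.any_eq_true.mpr ⟨tag, List.contains_iff_mem.mp h, isIn_self tag⟩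
    rw [this]

theorem firstA_eq (tag : String) (l : List (String × List String)) :
    firstCategoryA tag l
      = (l.find? (fun p => p.2.any (fun ct => PySem.Str.isIn ct tag))).map Prod.fst := by
  induction l with
  | nil => rfl
  | cons p rest ih =>
    obtain ⟨c, cts⟩ := p
    rw [firstCategoryA, cond_eq, List.find?_cons]
    cases h : cts.any (fun ct => PySem.Str.isIn ct tag)
    · rw [if_neg (by simp)]; exact ih
    · rw [if_pos (by simp)]; rfl

theorem catOf_eq (tag : String) :
    categoryOf tag = (firstCategoryA tag tagCategories).getD "uncategorized" := by
  rw [firstA_eq, categoryOf]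
  cases List.find? (fun p => p.2.any (fun ct => PySem.Str.isIn ct tag)) tagCategories <;> rfl

-- the body of A's tag loop
def stepA (d : PySem.Dict String (List String)) (tag : String) : PySem.Dict String (List String) :=
  match firstCategoryA tag tagCategories with
  | some c => d.modify c [] (fun v => v ++ [tag])
  | none   => d.modify "uncategorized" [] (fun v => v ++ [tag])

theorem stepA_eq (d : PySem.Dict String (List String)) (tag : String) :
    stepA d tag = d.modify (categoryOf tag) [] (fun v => v ++ [tag]) := by
  rw [stepA, catOf_eq]
  cases firstCategoryA tag tagCategories <;> rfl

theorem foldl_stepA (tags : List String) (d : PySem.Dict String (List String)) :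
    tags.foldl stepA d
      = (tags.map (fun t => (categoryOf t, t))).foldl
          (fun d p => d.modify p.1 [] (fun v => v ++ [p.2])) d := by
  rw [List.foldl_map]
  have h : stepA = fun d t => d.modify (categoryOf t) [] (fun v => v ++ [t]) :=
    funext fun d => funext fun t => stepA_eq d t
  rw [h]

theorem getD_final (tags : List String) (d : PySem.Dict String (List String)) (c : String) :
    (tags.foldl stepA d).getD c []
      = d.getD c [] ++ tags.filter (fun t => categoryOf t == c) := by
  rw [foldl_stepA, PySem.Dict.getD_foldl_modify_append, List.filter_map, List.map_map]
  simp [Function.comp_def]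

-- the (fixed) key list of A's dict = category keys then "uncategorized"
def allKeys : List String := tagCategories.map Prod.fst ++ ["uncategorized"]

theorem catOf_mem (tag : String) : categoryOf tag ∈ allKeys := by
  rw [categoryOf]
  cases h : List.find? (fun p => p.2.any (fun ct => PySem.Str.isIn ct tag)) tagCategories with
  | none => exact List.mem_append_right _ (List.mem_singleton.mpr rfl)
  | some p => exact List.mem_append_left _ (List.mem_map_of_mem (List.mem_of_find?_eq_some h))

-- A's initial dict (all buckets empty)
def dInit : PySem.Dict String (List String) :=
  (tagCategories.foldl (fun d p => d.insert p.1 []) PySem.Dict.empty).insert "uncategorized" []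

theorem keys_dInit : dInit.keys = allKeys := by decide

theorem getD_foldl_ins (l : List (String × List String)) (d : PySem.Dict String (List String))
    (hd : ∀ c, d.getD c [] = []) (c : String) :
    (l.foldl (fun d p => d.insert p.1 ([] : List String)) d).getD c [] = [] := by
  induction l generalizing d with
  | nil => exact hd c
  | cons p rest ih =>
    refine ih _ (fun c2 => ?_)
    by_cases h : c2 = p.1
    · subst h; exact PySem.Dict.getD_insert_self _ _ _ _
    · rw [PySem.Dict.getD_insert_of_ne _ _ _ h]; exact hd c2

theorem getD_dInit (c : String) : dInit.getD c [] = [] := by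
  rw [dInit]
  by_cases h : c = "uncategorized"
  · subst h; exact PySem.Dict.getD_insert_self _ _ _ _
  · rw [PySem.Dict.getD_insert_of_ne _ _ _ h]
    exact getD_foldl_ins _ _ (fun c2 => PySem.Dict.getD_empty _ _) c

theorem keys_final (tags : List String) :
    (tags.foldl stepA dInit).keys = allKeys := by
  rw [foldl_stepA, PySem.Dict.keys_foldl_modify_key _ Prod.fst [] (fun _ p v => v ++ [p.2]),
    keys_dInit, PySem.Set.update_eq_append_filter, List.map_map]
  have h : (PySem.Set.ofList ((tags.map (Prod.fst ∘ fun t => (categoryOf t, t))))).filter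
      (fun y => !(PySem.Set.contains allKeys y)) = [] := by
    rw [List.filter_eq_nil_iff]
    intro y hy
    have hm : y ∈ tags.map (Prod.fst ∘ fun t => (categoryOf t, t)) :=
      (PySem.Set.mem_ofList _ _).mp hy
    obtain ⟨t, _, rfl⟩ := List.mem_map.mp hm
    simp only [PySem.Set.contains_eq_listContains, Bool.not_eq_true', Bool.not_eq_false]
    exact List.contains_iff_mem.mpr (catOf_mem t)
  rw [h, List.append_nil]

theorem nodup_keys_final (tags : List String) :
    (tags.foldl stepA dInit).keys.Nodup := by
  rw [foldl_stepA]
  exact PySem.Dict.nodup_keys_foldl_modify_key _ Prod.fst [] (fun _ p v => v ++ [p.2]) _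
    (by rw [keys_dInit]; decide)

theorem items_final (tags : List String) :
    (tags.foldl stepA dInit).items
      = allKeys.map (fun c => (c, tags.filter (fun t => categoryOf t == c))) := by
  rw [PySem.Dict.items_eq_map_keys _ (nodup_keys_final tags) [], keys_final]
  refine List.map_congr_left (fun c _ => ?_)
  rw [getD_final, getD_dInit, List.nil_append]

theorem map_filter_filterMap (l : List String) (g : String → List String) :
    (l.map (fun c => (c, g c))).filter (fun kv => !kv.2.isEmpty)
      = l.filterMap (fun c => if (g c).isEmpty then none else some (c, g c)) := by
  induction l with
  | nil => rfl
  | cons c rest ih =>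
    simp only [List.map_cons, List.filter_cons, List.filterMap_cons]
    cases (g c).isEmpty <;> simp [ih]

-- A as a canonical closed form: each key's bucket is the tags whose first category is that key
theorem A_canon (tags : List String) :
    categorize_tags tags
      = allKeys.filterMap (fun c =>
          if (tags.filter (fun t => categoryOf t == c)).isEmpty then none
          else some (c, tags.filter (fun t => categoryOf t == c))) := by
  show ((tags.foldl stepA dInit).items.filter (fun kv => !kv.2.isEmpty)) = _
  rw [items_final, map_filter_filterMap]

-- ---------- B side ----------

-- match predicate against one category's tag list / against a whole table
def matchC (cts : List String) (t : String) : Bool := cts.any (fun ct => PySem.Str.isIn ct t)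
def matchL (l : List (String × List String)) (t : String) : Bool := l.any (fun p => matchC p.2 t)

-- first matching category in a table, as an Option
def fc (l : List (String × List String)) (t : String) : Option String :=
  (l.find? (fun p => matchC p.2 t)).map Prod.fst

-- one pass of scanCat over a state whose flags are q
theorem scanCat_map (cts : List String) (tags : List String) (q : String → Bool) :
    scanCat cts (tags.map (fun t => (t, q t)))
      = (tags.filter (fun t => !q t && matchC cts t),
         tags.map (fun t => (t, q t || matchC cts t))) := by
  induction tags with
  | nil => rfl
  | cons t ts ih =>
    simp only [List.map_cons, scanCat, ih, List.filter_cons, matchC]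
    cases hq : q t <;> cases hm : cts.any (fun ct => PySem.Str.isIn ct t) <;> simp

-- the buckets produced by the remaining categories, given flags q already set
def bucketsFrom (tags : List String) (q : String → Bool) :
    List (String × List String) → List (String × List String)
  | [] => []
  | p :: rest =>
    let b := tags.filter (fun t => !q t && matchC p.2 t)
    let r := bucketsFrom tags (fun t => q t || matchC p.2 t) rest
    if b.isEmpty then r else (p.1, b) :: r

-- B's fold over the categories, characterised
theorem foldB (l : List (String × List String)) (tags : List String)
    (acc : List (String × List String)) (q : String → Bool) :
    l.foldl (fun acc p =>
        let bs := scanCat p.2 acc.2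
        (if bs.1.isEmpty then acc.1 else acc.1 ++ [(p.1, bs.1)], bs.2))
      (acc, tags.map (fun t => (t, q t)))
    = (acc ++ bucketsFrom tags q l, tags.map (fun t => (t, q t || matchL l t))) := by
  induction l generalizing acc q with
  | nil => simp [bucketsFrom, matchL]
  | cons p rest ih =>
    rw [List.foldl_cons]
    simp only [scanCat_map]
    rw [ih]
    have hmap : (tags.map fun t => (t, (q t || matchC p.2 t) || matchL rest t))
        = tags.map fun t => (t, q t || matchL (p :: rest) t) := by
      refine List.map_congr_left (fun t _ => ?_)
      simp [matchL, Bool.or_assoc]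
    rw [hmap, bucketsFrom]
    cases (tags.filter (fun t => !q t && matchC p.2 t)).isEmpty <;> simp

theorem fc_cons (p : String × List String) (rest : List (String × List String)) (t : String) :
    fc (p :: rest) t = if matchC p.2 t then some p.1 else fc rest t := by
  cases hm : matchC p.2 t
  · rw [fc, List.find?_cons_of_neg (by simp [hm]), if_neg (by simp)]; rfl
  · rw [fc, List.find?_cons_of_pos (by simp [hm]), if_pos rfl]; rfl

-- canonical form of bucketsFrom when the table keys are distinct
theorem bucketsFrom_canon (tags : List String) (l : List (String × List String))
    (hnd : (l.map Prod.fst).Nodup) (q : String → Bool) :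
    bucketsFrom tags q l
      = (l.map Prod.fst).filterMap (fun c =>
          if (tags.filter (fun t => !q t && (fc l t == some c))).isEmpty then none
          else some (c, tags.filter (fun t => !q t && (fc l t == some c)))) := by
  induction l generalizing q with
  | nil => rfl
  | cons p rest ih =>
    rw [List.map_cons, List.nodup_cons] at hnd
    obtain ⟨hc, hndr⟩ := hnd
    -- head bucket agreement
    have hb : tags.filter (fun t => !q t && (fc (p :: rest) t == some p.1))
        = tags.filter (fun t => !q t && matchC p.2 t) := by
      refine List.filter_congr (fun t _ => ?_)
      rw [fc_cons]
      cases hm : matchC p.2 t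
      · have hne : fc rest t ≠ some p.1 := by
          intro he
          rcases Option.map_eq_some_iff.mp he with ⟨pe, hpe, hfst⟩
          exact hc (hfst ▸ List.mem_map_of_mem (List.mem_of_find?_eq_some hpe))
        simp [hne]
      · simp
    -- tail buckets agreement
    have ht : ∀ c ∈ rest.map Prod.fst,
        tags.filter (fun t => !q t && (fc (p :: rest) t == some c))
          = tags.filter (fun t => !(q t || matchC p.2 t) && (fc rest t == some c)) := by
      intro c hcm
      refine List.filter_congr (fun t _ => ?_)
      rw [fc_cons]
      cases hm : matchC p.2 t
      · simp
      · have : p.1 ≠ c := fun he => hc (he ▸ hcm)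
        simp [this]
    rw [bucketsFrom, List.map_cons, List.filterMap_cons]
    simp only [hb]
    have htail : (rest.map Prod.fst).filterMap (fun c =>
          if (tags.filter (fun t => !q t && (fc (p :: rest) t == some c))).isEmpty then none
          else some (c, tags.filter (fun t => !q t && (fc (p :: rest) t == some c))))
        = bucketsFrom tags (fun t => q t || matchC p.2 t) rest := by
      rw [ih hndr]
      exact (List.filterMap_congr (fun c hcm => by rw [ht c hcm])).symm
    rw [htail]
    cases (tags.filter (fun t => !q t && matchC p.2 t)).isEmpty <;> simp

theorem nodup_keys_table : (tagCategories.map Prod.fst).Nodup := by decide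

theorem uncat_not_key : "uncategorized" ∉ tagCategories.map Prod.fst := by decide

-- categoryOf vs fc on the full table
theorem catOf_fc (t : String) :
    categoryOf t = (fc tagCategories t).getD "uncategorized" := by
  rw [categoryOf, fc]
  simp only [matchC]
  cases List.find? (fun p => p.2.any (fun ct => PySem.Str.isIn ct t)) tagCategories <;> rfl

-- for a key c, "first category of t is c" matches A's label test
theorem key_bucket_eq (tags : List String) (c : String)
    (hc : c ∈ tagCategories.map Prod.fst) :
    tags.filter (fun t => !(false : Bool) && (fc tagCategories t == some c))
      = tags.filter (fun t => categoryOf t == c) := by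
  refine List.filter_congr (fun t _ => ?_)
  rw [catOf_fc]
  cases h : fc tagCategories t with
  | none =>
    have : "uncategorized" ≠ c := fun he => uncat_not_key (he ▸ hc)
    simp [this]
  | some c' => simp

-- the leftover tags are exactly A's "uncategorized" bucket
theorem matchL_false_iff (t : String) :
    (matchL tagCategories t = false)
      ↔ List.find? (fun p => matchC p.2 t) tagCategories = none := by
  rw [List.find?_eq_none, matchL, List.any_eq_false]

theorem uncat_iff (t : String) :
    (matchL tagCategories t = false) ↔ (categoryOf t == "uncategorized") = true := by
  rw [matchL_false_iff, catOf_fc, fc]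
  cases hf : List.find? (fun p => matchC p.2 t) tagCategories with
  | none => simp
  | some pe =>
    have hk : pe.1 ∈ tagCategories.map Prod.fst :=
      List.mem_map_of_mem (List.mem_of_find?_eq_some hf)
    have hne : pe.1 ≠ "uncategorized" := fun he => uncat_not_key (he ▸ hk)
    simp [hne]

theorem rest_eq (tags : List String) :
    (tags.map (fun t => (t, (false : Bool) || matchL tagCategories t))).filterMap
        (fun tp => if tp.2 then none else some tp.1)
      = tags.filter (fun t => categoryOf t == "uncategorized") := by
  induction tags with
  | nil => rfl
  | cons t ts ih =>
    cases hm : matchL tagCategories t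
    · have h2 : (categoryOf t == "uncategorized") = true := (uncat_iff t).mp hm
      simp only [List.map_cons, List.filterMap_cons, List.filter_cons, Bool.false_or, hm, h2]
      simpa using ih
    · have h2 : (categoryOf t == "uncategorized") = false := by
        cases h : (categoryOf t == "uncategorized") with
        | false => rfl
        | true => rw [(uncat_iff t).mpr h] at hm; exact absurd hm (by simp)
      simp only [List.map_cons, List.filterMap_cons, List.filter_cons, Bool.false_or, hm, h2]
      simpa using ih

theorem main_eq (tags : List String) :
    categorize_tags tags = categorize_tags_alt tags := by
  rw [A_canon]
  show _ = (let state0 := tags.map (fun tag => (tag, false)); _)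
  simp only [categorize_tags_alt]
  rw [show (fun tag => (tag, false)) = (fun t : String => (t, (fun _ : String => false) t)) from rfl]
  rw [foldB tagCategories tags [] (fun _ => false), List.nil_append]
  rw [bucketsFrom_canon tags tagCategories nodup_keys_table (fun _ => false)]
  rw [rest_eq]
  rw [allKeys, List.filterMap_append]
  have h1 : (tagCategories.map Prod.fst).filterMap (fun c =>
        if (tags.filter (fun t => categoryOf t == c)).isEmpty then none
        else some (c, tags.filter (fun t => categoryOf t == c)))
      = (tagCategories.map Prod.fst).filterMap (fun c =>
        if (tags.filter (fun t => !(false : Bool) && (fc tagCategories t == some c))).isEmpty then none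
        else some (c, tags.filter (fun t => !(false : Bool) && (fc tagCategories t == some c)))) := by
    exact (List.filterMap_congr (fun c hc => by rw [key_bucket_eq tags c hc])).symm
  rw [h1]
  cases h : (tags.filter (fun t => categoryOf t == "uncategorized")).isEmpty <;>
    simp [List.filterMap, h]

-- ===== VERDICT (by name: the statement is the Claim_ definition above) =====
theorem categorize_tags_spec : Claim_equal_categorize_tags := by
  intro tags _
  exact main_eq tags
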